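-- pv_equiv track=rewrite | github.com/dbrainbowHub/Number_Gen | lotto_generator.py | check_consecutive
-- ===== SOURCE A (Python) =====
-- def check_consecutive(numbers):
--     nums = sorted(numbers)
--     cons = []
--     i = 0
--     while i < 5:
--         if nums[i+1] - nums[i] == 1:
--             # 연속 시작
--             cnt = 2
--             while i+cnt < 6 and nums[i+cnt] - nums[i+cnt-1] == 1:
--                 cnt += 1
--             cons.append(cnt)
--             i += cnt
--         else:
--             i += 1
--     return cons.count(2) == 1 and all(c < 3 for c in cons)
-- ===== SOURCE B (Python) =====
-- def check_consecutive(numbers):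
--     nums = sorted(numbers)
--     c = sum(1 for i in range(5) if nums[i + 1] - nums[i] == 1)
--     return c == 1
-- ===== Notes on version B (the rewrite author's own statement) =====
-- stated objective: simpler
-- what changed: Replaces A's nested run-grouping while-loops and run-length list with a single pass that counts adjacent sorted pairs differing by exactly 1 and tests that the count equals 1.
import Mathlib
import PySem

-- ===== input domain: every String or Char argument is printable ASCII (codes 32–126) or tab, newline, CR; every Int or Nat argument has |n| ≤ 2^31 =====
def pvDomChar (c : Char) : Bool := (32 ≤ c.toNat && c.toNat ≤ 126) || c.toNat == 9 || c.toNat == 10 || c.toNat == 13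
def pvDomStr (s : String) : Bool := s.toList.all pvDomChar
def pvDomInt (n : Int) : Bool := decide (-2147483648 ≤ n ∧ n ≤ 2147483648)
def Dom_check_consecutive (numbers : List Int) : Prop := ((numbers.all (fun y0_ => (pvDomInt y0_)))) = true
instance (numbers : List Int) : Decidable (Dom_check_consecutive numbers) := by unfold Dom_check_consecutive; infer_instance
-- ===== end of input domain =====

-- B: replaces A's nested run-grouping loops and run-length list with one count of adjacent
-- sorted pairs at distance 1, returning (count == 1); same cost, simpler.


-- ===== PORT A =====
-- inner while: `while i+cnt < 6 and nums[i+cnt] - nums[i+cnt-1] == 1: cnt += 1`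
-- fuel only makes the loop total; it never changes the computed value (≤ 6 iterations possible)
def pvInner (nums : List Int) (i cnt : Nat) : Nat → Nat
  | 0 => cnt
  | fuel + 1 =>
    if i + cnt < 6 && (PySem.List.pyGetD nums ((i + cnt : Nat) : Int) 0 - PySem.List.pyGetD nums ((i + cnt - 1 : Nat) : Int) 0 == 1)
    then pvInner nums i (cnt + 1) fuel
    else cnt

-- outer while: `while i < 5: …` (i grows by at least 1 each turn, so 6 fuel suffices)
def pvOuter (nums : List Int) (i : Nat) (cons : List Int) : Nat → List Int
  | 0 => cons
  | fuel + 1 =>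
    if i < 5 then
      if PySem.List.pyGetD nums ((i + 1 : Nat) : Int) 0 - PySem.List.pyGetD nums ((i : Nat) : Int) 0 == 1 then
        let cnt := pvInner nums i 2 6
        pvOuter nums (i + cnt) (cons ++ [(cnt : Int)]) fuel
      else pvOuter nums (i + 1) cons fuel
    else cons

def check_consecutive (numbers : List Int) : Bool :=
  let nums := PySem.List.sorted numbers (fun x => x)
  let cons := pvOuter nums 0 [] 6
  (PySem.List.count cons 2 == 1) && cons.all (fun c => decide (c < 3))

-- ===== PORT B =====
def check_consecutive_alt (numbers : List Int) : Bool :=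
  let nums := PySem.List.sorted numbers (fun x => x)
  let c : Int := (PySem.List.pyRange 0 5 1).foldl
    (fun acc i => if PySem.List.pyGetD nums (i + 1) 0 - PySem.List.pyGetD nums i 0 == 1 then acc + 1 else acc) 0
  c == 1

-- ===== PRECONDITION & SPEC =====
-- Both A and B index the first six sorted elements, so a list shorter than six raises IndexError in each.
def Pre_check_consecutive (numbers : List Int) : Prop := 6 ≤ numbers.length
instance (numbers : List Int) : Decidable (Pre_check_consecutive numbers) := by unfold Pre_check_consecutive; infer_instance
def pvWitness_check_consecutive : List Int := [3, 9, 1, 2, 30, 17]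

def Spec_check_consecutive (numbers : List Int) (out : Bool) : Prop := out = check_consecutive_alt numbers
instance (numbers : List Int) (out : Bool) : Decidable (Spec_check_consecutive numbers out) := by unfold Spec_check_consecutive; infer_instance

-- ===== CLAIM (what is proved, stated in full; the proofs are below) =====
def Claim_equal_check_consecutive : Prop := ∀ (numbers : List Int), Dom_check_consecutive numbers → Pre_check_consecutive numbers → Spec_check_consecutive numbers (check_consecutive numbers)

-- ===== LEMMAS AND PROOFS =====

-- both ports look only at the first six elements of the sorted list; on a list of shape
-- a::b::c::d::e::f::t everything reduces once the five adjacent tests are decided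
set_option maxHeartbeats 4000000 in
lemma pv_key (a b c d e f : Int) (t : List Int) :
    (let nums := a :: b :: c :: d :: e :: f :: t
     let cons := pvOuter nums 0 [] 6
     ((PySem.List.count cons 2 == 1) && cons.all (fun x => decide (x < 3)))) =
    (let nums := a :: b :: c :: d :: e :: f :: t
     ((PySem.List.pyRange 0 5 1).foldl
        (fun acc i => if PySem.List.pyGetD nums (i + 1) 0 - PySem.List.pyGetD nums i 0 == 1 then acc + 1 else acc)
        (0 : Int)) == 1) := by
  have hr : PySem.List.pyRange 0 5 1 = [0, 1, 2, 3, 4] := by decide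
  by_cases h1 : b - a = 1 <;> by_cases h2 : c - b = 1 <;> by_cases h3 : d - c = 1 <;>
    by_cases h4 : e - d = 1 <;> by_cases h5 : f - e = 1 <;>
  simp [hr, pvOuter, pvInner, PySem.List.pyGetD_ofNat', PySem.List.count, h1, h2, h3, h4, h5]

-- ===== VERDICT (by name: the statement is the Claim_ definition above) =====
theorem check_consecutive_spec : Claim_equal_check_consecutive := by
  intro numbers _ hpre
  unfold Spec_check_consecutive check_consecutive check_consecutive_alt
  have hlen : 6 ≤ (PySem.List.sorted numbers (fun x => x)).length := by
    rw [PySem.List.length_sorted]; exact hpre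
  obtain ⟨a, b, c, d, e, f, t, hs⟩ :
      ∃ a b c d e f t, PySem.List.sorted numbers (fun x => x) = a :: b :: c :: d :: e :: f :: t := by
    match h : PySem.List.sorted numbers (fun x => x), hlen with
    | a :: b :: c :: d :: e :: f :: t, _ => exact ⟨a, b, c, d, e, f, t, rfl⟩
  rw [hs]
  exact pv_key a b c d e f t
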